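-- pv_equiv track=rewrite | github.com/SamvitJ/LinkMeUp-Analytics | analyze_session.py | returnInsights
-- ===== SOURCE A (Python) =====
-- def returnInsights (session_logs):
--
--    insights = {
--       "notifications" : None,
--       "device_model": None
--    }
--
--    notifications_none = "Notifications - None"
--    notifications_alert = "Notifications - Alert"
--    notifications_badge = "Notifications - Badge"
--    notifications_sound = "Notifications - Sound"
--    notifications_content = "Notifications - ContentAvailability"
--
--    device_model_4 = "iPhone 4"
--    device_model_5 = "iPhone >= 5"
--
--    for log in session_logs["messages"]:
--
--       # notifications
--       if notifications_none in log:
--          insights["notifications"] = "Off"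
--
--       elif notifications_alert in log:
--          insights["notifications"] = "Alert"
--
--       elif any(str in log for str in [notifications_badge, notifications_sound, notifications_content]):
--          insights["notifications"] = "Other"
--
--       # device
--       if device_model_4 in log:
--          insights["device_model"] = "iPhone 4"
--
--       elif device_model_5 in log:
--          insights["device_model"] = "iPhone 5+"
--
--    return insights
-- ===== SOURCE B (Python) =====
-- NOTIF_NONE = "Notifications - None"
-- NOTIF_ALERT = "Notifications - Alert"
-- NOTIF_ANY = [NOTIF_NONE, NOTIF_ALERT, "Notifications - Badge",
--              "Notifications - Sound", "Notifications - ContentAvailability"]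
--
--
-- def _scan_notifications(messages):
--     # last log mentioning any notification setting decides the value
--     for log in reversed(messages):
--         if any(s in log for s in NOTIF_ANY):
--             if NOTIF_NONE in log:
--                 return "Off"
--             if NOTIF_ALERT in log:
--                 return "Alert"
--             return "Other"
--     return None
--
--
-- def _scan_device(messages):
--     for log in reversed(messages):
--         if "iPhone 4" in log:
--             return "iPhone 4"
--         if "iPhone >= 5" in log:
--             return "iPhone 5+"
--     return None
--
--
-- def returnInsights(session_logs):
--     messages = session_logs["messages"]
--     return {
--         "notifications": _scan_notifications(messages),
--         "device_model": _scan_device(messages),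
--     }
-- ===== Notes on version B (the rewrite author's own statement) =====
-- stated objective: alternative
-- what changed: Replaces A's single forward pass that keeps overwriting a dict with two independent reverse scans that stop at the first (i.e. last) matching log per category.
import Mathlib
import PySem

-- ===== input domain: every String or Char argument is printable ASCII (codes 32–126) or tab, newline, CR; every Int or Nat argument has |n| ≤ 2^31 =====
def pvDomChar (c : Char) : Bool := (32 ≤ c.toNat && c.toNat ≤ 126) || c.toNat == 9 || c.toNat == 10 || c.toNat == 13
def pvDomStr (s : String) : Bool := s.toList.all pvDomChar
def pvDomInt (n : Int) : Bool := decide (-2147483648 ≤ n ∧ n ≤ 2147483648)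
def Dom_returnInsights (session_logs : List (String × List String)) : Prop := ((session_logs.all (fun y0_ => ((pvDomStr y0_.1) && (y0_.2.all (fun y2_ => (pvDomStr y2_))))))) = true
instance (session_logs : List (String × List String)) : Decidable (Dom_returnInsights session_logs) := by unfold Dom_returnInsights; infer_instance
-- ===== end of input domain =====

-- B replaces A's forward overwrite-fold over a dict by two independent reverse scans
-- that stop at the first (= last) matching log per category (objective: alternative).


-- ===== PORT A =====
-- the loop body of A: update the insights dict from one log line
def pvStepA (ins : PySem.Dict String (Option String)) (log : String) : PySem.Dict String (Option String) :=
  let ins1 :=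
    if PySem.Str.isIn "Notifications - None" log then ins.insert "notifications" (some "Off")
    else if PySem.Str.isIn "Notifications - Alert" log then ins.insert "notifications" (some "Alert")
    else if ["Notifications - Badge", "Notifications - Sound", "Notifications - ContentAvailability"].any
              (fun s => PySem.Str.isIn s log) then ins.insert "notifications" (some "Other")
    else ins
  if PySem.Str.isIn "iPhone 4" log then ins1.insert "device_model" (some "iPhone 4")
  else if PySem.Str.isIn "iPhone >= 5" log then ins1.insert "device_model" (some "iPhone 5+")
  else ins1

def returnInsights (session_logs : List (String × List String)) : List (String × Option String) :=
  -- session_logs["messages"]: first-match lookup; Pre_ guarantees the key is present (else Python raises KeyError)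
  let messages := ((session_logs.find? (fun p => p.1 == "messages")).map Prod.snd).getD []
  (messages.foldl pvStepA (PySem.Dict.ofList [("notifications", none), ("device_model", none)])).items

-- ===== PORT B =====
def pvNotifAny (log : String) : Bool :=
  ["Notifications - None", "Notifications - Alert", "Notifications - Badge",
   "Notifications - Sound", "Notifications - ContentAvailability"].any (fun s => PySem.Str.isIn s log)

def pvClassifyNotif (log : String) : String :=
  if PySem.Str.isIn "Notifications - None" log then "Off"
  else if PySem.Str.isIn "Notifications - Alert" log then "Alert"
  else "Other"

-- reverse scan: first matching log (from the end) decides the value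
def pvScanNotif : List String → Option String
  | [] => none
  | log :: rest => if pvNotifAny log then some (pvClassifyNotif log) else pvScanNotif rest

def pvScanDev : List String → Option String
  | [] => none
  | log :: rest =>
    if PySem.Str.isIn "iPhone 4" log then some "iPhone 4"
    else if PySem.Str.isIn "iPhone >= 5" log then some "iPhone 5+"
    else pvScanDev rest

def returnInsights_alt (session_logs : List (String × List String)) : List (String × Option String) :=
  let messages := ((session_logs.find? (fun p => p.1 == "messages")).map Prod.snd).getD []
  [("notifications", pvScanNotif messages.reverse), ("device_model", pvScanDev messages.reverse)]

-- ===== PRECONDITION & SPEC =====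
-- Pre_ excludes exactly the inputs where Python A raises KeyError: no "messages" key.
def Pre_returnInsights (session_logs : List (String × List String)) : Prop :=
  "messages" ∈ session_logs.map Prod.fst
instance (session_logs : List (String × List String)) : Decidable (Pre_returnInsights session_logs) := by unfold Pre_returnInsights; infer_instance
def pvWitness_returnInsights : (List (String × List String)) := [("messages", ["Notifications - Alert", "iPhone 4"])]
def Spec_returnInsights (session_logs : List (String × List String)) (out : List (String × Option String)) : Prop := out = returnInsights_alt session_logs
instance (session_logs : List (String × List String)) (out : List (String × Option String)) : Decidable (Spec_returnInsights session_logs out) := by unfold Spec_returnInsights; infer_instance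

-- ===== CLAIM (what is proved, stated in full; the proofs are below) =====
def Claim_equal_returnInsights : Prop := ∀ (session_logs : List (String × List String)), Dom_returnInsights session_logs → Pre_returnInsights session_logs → Spec_returnInsights session_logs (returnInsights session_logs)

-- ===== LEMMAS AND PROOFS =====

lemma pvInsN (n d v : Option String) :
    (PySem.Dict.mk [("notifications", n), ("device_model", d)]).insert "notifications" v
      = PySem.Dict.mk [("notifications", v), ("device_model", d)] := rfl

lemma pvInsD (n d v : Option String) :
    (PySem.Dict.mk [("notifications", n), ("device_model", d)]).insert "device_model" v
      = PySem.Dict.mk [("notifications", n), ("device_model", v)] := rfl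

-- one loop iteration of A on the two-key dict, expressed through B's per-log classifiers
lemma pvStepA_mk (n d : Option String) (log : String) :
    pvStepA (PySem.Dict.mk [("notifications", n), ("device_model", d)]) log
      = PySem.Dict.mk
          [("notifications", (if pvNotifAny log then some (pvClassifyNotif log) else none).or n),
           ("device_model",
            (if PySem.Str.isIn "iPhone 4" log then some "iPhone 4"
             else if PySem.Str.isIn "iPhone >= 5" log then some "iPhone 5+" else none).or d)] := by
  unfold pvStepA pvNotifAny pvClassifyNotif
  by_cases h0 : PySem.Str.isIn "Notifications - None" log = true <;>
  by_cases h1 : PySem.Str.isIn "Notifications - Alert" log = true <;>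
  by_cases h2 : PySem.Str.isIn "Notifications - Badge" log = true <;>
  by_cases h3 : PySem.Str.isIn "Notifications - Sound" log = true <;>
  by_cases h4 : PySem.Str.isIn "Notifications - ContentAvailability" log = true <;>
  by_cases h5 : PySem.Str.isIn "iPhone 4" log = true <;>
  by_cases h6 : PySem.Str.isIn "iPhone >= 5" log = true <;>
  simp only [h0, h1, h2, h3, h4, h5, h6, List.any_cons, List.any_nil, Bool.or_true,
    Bool.or_false, Bool.or_self, if_true, Bool.not_eq_true] at * <;>
  simp_all [pvInsN, pvInsD, Option.or]

-- the fold over any message list, from any starting values, is the two reverse scans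
lemma pvFold_eq (msgs : List String) (n d : Option String) :
    msgs.foldl pvStepA (PySem.Dict.mk [("notifications", n), ("device_model", d)])
      = PySem.Dict.mk [("notifications", (pvScanNotif msgs.reverse).or n),
                       ("device_model", (pvScanDev msgs.reverse).or d)] := by
  induction msgs using List.reverseRecOn generalizing n d with
  | nil => simp [pvScanNotif, pvScanDev, Option.or]
  | append_singleton ms log ih =>
    rw [List.foldl_append, ih]
    simp only [List.foldl_cons, List.foldl_nil, pvStepA_mk, List.reverse_append,
      List.reverse_cons, List.reverse_nil, List.nil_append, List.cons_append,
      pvScanNotif, pvScanDev]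
    by_cases hn : pvNotifAny log = true <;>
    by_cases h5 : PySem.Str.isIn "iPhone 4" log = true <;>
    by_cases h6 : PySem.Str.isIn "iPhone >= 5" log = true <;>
    simp_all [Option.or]

-- ===== VERDICT (by name: the statement is the Claim_ definition above) =====
theorem returnInsights_spec : Claim_equal_returnInsights := by
  intro session_logs _ _
  show returnInsights session_logs = returnInsights_alt session_logs
  unfold returnInsights returnInsights_alt
  simp only [show (PySem.Dict.ofList [("notifications", none), ("device_model", none)] :
        PySem.Dict String (Option String))
      = PySem.Dict.mk [("notifications", none), ("device_model", none)] from rfl,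
    pvFold_eq, Option.or_none]
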